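-- pv_equiv track=rewrite | github.com/csotogd/Music-Score-Localization-2.0 | localization/hashes/sliding_window_v2/utils.py | best_matches_sw2
-- ===== SOURCE A (Python) =====
-- def matches_dict_sw2(sample_hashes: dict, song_hashes: dict):
--     sample_hash_sets = list(sample_hashes.values())
--     sample_len = len(sample_hash_sets)
--     song_hash_sets = list(song_hashes.values())
--     song_times = list(song_hashes.keys())
--     song_len = len(song_hash_sets)
--     matches = {}
--     for i in range(song_len - sample_len):
--         score = sum(
--             len(sample_hash_set.intersection(song_hash_set))
--             for sample_hash_set, song_hash_set in zip(
--                 sample_hash_sets, song_hash_sets[i : i + sample_len]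
--             )
--         )
--         matches[song_times[i]] = score
--
--     return matches
--
-- def best_matches_sw2(sample_hashes, song_hashes):
--     matches = matches_dict_sw2(sample_hashes, song_hashes)
--     match_times = []
--     max_matches = 0
--
--     for time in matches:
--         if matches[time] > max_matches:
--             max_matches = matches[time]
--             match_times = [time]
--         elif matches[time] == max_matches:
--             match_times.append(time)
--
--     return match_times, max_matches
-- ===== SOURCE B (Python) =====
-- def best_matches_sw2(sample_hashes, song_hashes):
--     sample_sets = list(sample_hashes.values())
--     song_sets = list(song_hashes.values())
--     song_times = list(song_hashes.keys())
--     n = len(song_sets) - len(sample_sets)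
--     if n <= 0:
--         return [], 0
--     # inverted index: hash value -> sample positions holding it
--     index = {}
--     for j, s in enumerate(sample_sets):
--         for h in s:
--             index.setdefault(h, []).append(j)
--     # bucket every coincident hash pair (sample pos j, song pos k) at offset i = k - j
--     counts = [0] * n
--     for k, s in enumerate(song_sets):
--         for h in s:
--             for j in index.get(h, []):
--                 i = k - j
--                 if 0 <= i < n:
--                     counts[i] += 1
--     best = max(counts)
--     return [t for t, c in zip(song_times, counts) if c == best], best
-- ===== Notes on version B (the rewrite author's own statement) =====
-- stated objective: alternative
-- what changed: Replaces A's per-offset window rescan (for every offset, intersect each sample set with each aligned song set) by an inverted hash index over the sample plus a single pass over the song that buckets each coincident (sample position, song position) hash pair into offset bucket i = k - j, then takes the max/argmax of the buckets; it trades the nested window scan for index construction and bucket accumulation.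
import Mathlib
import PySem

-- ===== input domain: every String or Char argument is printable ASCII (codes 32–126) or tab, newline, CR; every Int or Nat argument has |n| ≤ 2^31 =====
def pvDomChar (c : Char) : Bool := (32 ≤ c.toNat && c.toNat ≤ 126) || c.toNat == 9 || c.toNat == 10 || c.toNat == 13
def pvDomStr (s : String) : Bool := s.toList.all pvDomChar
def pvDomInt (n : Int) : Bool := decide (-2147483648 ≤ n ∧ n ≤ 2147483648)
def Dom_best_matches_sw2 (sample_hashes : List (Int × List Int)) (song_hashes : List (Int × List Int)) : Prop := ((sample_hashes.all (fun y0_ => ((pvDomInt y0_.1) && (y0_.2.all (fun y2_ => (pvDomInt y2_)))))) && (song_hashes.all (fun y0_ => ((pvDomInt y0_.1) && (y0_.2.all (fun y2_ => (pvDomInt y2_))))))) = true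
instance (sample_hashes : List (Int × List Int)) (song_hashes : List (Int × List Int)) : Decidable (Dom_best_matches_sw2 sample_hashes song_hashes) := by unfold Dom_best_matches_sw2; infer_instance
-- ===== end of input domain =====

-- B replaces A's per-offset window rescan by an inverted hash index over the sample and one
-- bucket-accumulation pass over the song (offset bucket i = k - j), then max/argmax of the buckets.
-- Both ports read their dict[int, set[int]] arguments through pvToDict (the type convention's
-- assoc-list marshalling: duplicate keys overwrite in place, value lists are deduplicated sets).

-- ===== PORT A =====
def pvToDict (l : List (Int × List Int)) : PySem.Dict Int (PySem.Set Int) :=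
  PySem.Dict.ofList (l.map (fun p => (p.1, PySem.Set.ofList p.2)))

def matches_dict_sw2 (sample_hashes song_hashes : PySem.Dict Int (PySem.Set Int)) :
    PySem.Dict Int Int :=
  let sample_hash_sets := sample_hashes.values
  let sample_len := sample_hash_sets.length
  let song_hash_sets := song_hashes.values
  let song_times := song_hashes.keys
  let song_len := song_hash_sets.length
  (PySem.List.pyRange 0 ((song_len : Int) - (sample_len : Int))).foldl
    (fun matchesD i =>
      let score : Int :=
        ((sample_hash_sets.zip
            (PySem.List.slice song_hash_sets (some i) (some (i + (sample_len : Int))))).map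
          (fun p => PySem.Set.len (PySem.Set.inter p.1 p.2))).sum
      matchesD.insert (PySem.List.pyGetD song_times i 0) score)
    PySem.Dict.empty

def best_matches_sw2 (sample_hashes : List (Int × List Int)) (song_hashes : List (Int × List Int)) : List Int × Int :=
  let matchesD := matches_dict_sw2 (pvToDict sample_hashes) (pvToDict song_hashes)
  matchesD.keys.foldl
    (fun st time =>
      if matchesD.getD time 0 > st.2 then ([time], matchesD.getD time 0)
      else if matchesD.getD time 0 = st.2 then (st.1 ++ [time], st.2)
      else st)
    ([], 0)

-- ===== PORT B =====
def best_matches_sw2_alt (sample_hashes : List (Int × List Int)) (song_hashes : List (Int × List Int)) : List Int × Int :=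
  let sample_sets := (pvToDict sample_hashes).values
  let songD := pvToDict song_hashes
  let song_sets := songD.values
  let song_times := songD.keys
  let n : Int := (song_sets.length : Int) - (sample_sets.length : Int)
  if n ≤ 0 then ([], 0)
  else
    let index : PySem.Dict Int (List Int) :=
      (PySem.List.enumerate sample_sets).foldl
        (fun d p => p.2.foldl (fun d h => d.modify h [] (· ++ [p.1])) d) PySem.Dict.empty
    let counts : List Int :=
      (PySem.List.enumerate song_sets).foldl
        (fun c p => p.2.foldl
          (fun c h => (index.getD h []).foldl
            (fun c j =>
              let i := p.1 - j
              if 0 ≤ i ∧ i < n then PySem.List.pySetD c i (PySem.List.pyGetD c i 0 + 1) else c)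
            c)
          c)
        (List.replicate n.toNat 0)
    let best := (PySem.List.max? counts (fun x => x)).getD 0
    (((song_times.zip counts).filter (fun p => p.2 == best)).map (·.1), best)

-- ===== PRECONDITION & SPEC =====
def Spec_best_matches_sw2 (sample_hashes : List (Int × List Int)) (song_hashes : List (Int × List Int)) (out : List Int × Int) : Prop := out = best_matches_sw2_alt sample_hashes song_hashes
instance (sample_hashes : List (Int × List Int)) (song_hashes : List (Int × List Int)) (out : List Int × Int) : Decidable (Spec_best_matches_sw2 sample_hashes song_hashes out) := by unfold Spec_best_matches_sw2; infer_instance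

-- ===== CLAIM (what is proved, stated in full; the proofs are below) =====
def Claim_equal_best_matches_sw2 : Prop := ∀ (sample_hashes : List (Int × List Int)) (song_hashes : List (Int × List Int)), Dom_best_matches_sw2 sample_hashes song_hashes → Spec_best_matches_sw2 sample_hashes song_hashes (best_matches_sw2 sample_hashes song_hashes)

-- ===== LEMMAS AND PROOFS =====

lemma map_getD_range_eq_take {α : Type} (xs : List α) (N : Nat) (d : α) (h : N ≤ xs.length) :
    (List.range N).map (fun i => xs.getD i d) = xs.take N := by
  apply List.ext_getElem
  · simp [h]
  · intro i h1 h2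
    simp only [List.getElem_map, List.getElem_range, List.getElem_take]
    rw [List.getD_eq_getElem]

def pvScore (S T : List (List Int)) (i : Nat) : Int :=
  ((S.zip (List.take S.length (List.drop i T))).map
    (fun p => PySem.Set.len (PySem.Set.inter p.1 p.2))).sum

def pvPairs (times : List Int) (S T : List (List Int)) (N : Nat) : List (Int × Int) :=
  (List.range N).map (fun i => (times.getD i 0, pvScore S T i))

lemma pyRange_zero_sub' (m L : Nat) :
    PySem.List.pyRange 0 ((L : Int) - (m : Int)) =
      List.map (fun k => ((k : Nat) : Int)) (List.range (((L : Int) - (m : Int)).toNat)) := by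
  by_cases h : (m : Int) ≤ (L : Int)
  · have h2 : (L : Int) - (m : Int) = ((((L : Int) - (m : Int)).toNat : Nat) : Int) := by omega
    rw [h2, PySem.List.pyRange_zero_natCast, Int.toNat_natCast]
  · have h1 : (((L : Int) - (m : Int)).toNat) = 0 := by omega
    rw [h1]
    simp only [List.range_zero, List.map_nil]
    rw [List.eq_nil_iff_forall_not_mem]
    intro x hx
    rw [PySem.List.mem_pyRange_one] at hx
    omega

lemma keys_length_eq_values_length {κ ν : Type} [BEq κ] (d : PySem.Dict κ ν) :
    d.keys.length = d.values.length := by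
  simp [PySem.Dict.keys, PySem.Dict.values]

lemma matchesD_items (d e : PySem.Dict Int (PySem.Set Int)) (hk : e.keys.Nodup) :
    (matches_dict_sw2 d e).items =
      pvPairs e.keys d.values e.values
        (((e.values.length : Int) - (d.values.length : Int)).toNat) := by
  unfold matches_dict_sw2
  simp only []
  set m := d.values.length with hm
  set L := e.values.length with hL
  set N := (((L : Nat) : Int) - ((m : Nat) : Int)).toNat with hN
  have hNL : N ≤ L := by omega
  have hkl : e.keys.length = L := keys_length_eq_values_length e
  rw [pyRange_zero_sub', List.foldl_map]
  have hfresh : ∀ a ∈ List.range N, (PySem.Dict.empty : PySem.Dict Int Int).contains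
      (PySem.List.pyGetD e.keys ((a : Nat) : Int) 0) = false := by
    intro a _; exact PySem.Dict.contains_empty _
  have hnd : ((List.range N).map (fun i => PySem.List.pyGetD e.keys ((i : Nat) : Int) 0)).Nodup := by
    have : ((List.range N).map (fun i => PySem.List.pyGetD e.keys ((i : Nat) : Int) 0)) =
        e.keys.take N := by
      rw [show (fun i => PySem.List.pyGetD e.keys ((i : Nat) : Int) 0) =
          (fun i => e.keys.getD i 0) from funext (fun i => PySem.List.pyGetD_natCast _ _ _)]
      exact map_getD_range_eq_take _ _ _ (hkl ▸ hNL)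
    rw [this]
    exact hk.sublist (List.take_sublist _ _)
  rw [PySem.Dict.items_foldl_insert_fresh (List.range N) _ _ _ hfresh hnd]
  unfold pvPairs
  rw [show (PySem.Dict.empty : PySem.Dict Int Int).items = [] from rfl, List.nil_append]
  apply List.map_congr_left
  intro i hi
  rw [List.mem_range] at hi
  have h1 : PySem.List.pyGetD e.keys ((i : Nat) : Int) 0 = e.keys.getD i 0 :=
    PySem.List.pyGetD_natCast _ _ _
  have h2 : ((i : Int) + (m : Int)) = (((i + m : Nat) : Nat) : Int) := by push_cast; ring
  rw [h1, h2, PySem.List.slice_natCast]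
  have h3 : i + m - i = m := by omega
  rw [h3]
  rfl

lemma sel_spec' (l : List (Int × Int)) : ∀ (ts : List Int) (a : Int),
    l.foldl
      (fun st p =>
        if p.2 > st.2 then ([p.1], p.2)
        else if p.2 = st.2 then (st.1 ++ [p.1], st.2)
        else st) (ts, a)
    = ((if a = l.foldl (fun b p => max b p.2) a then ts else []) ++
        (l.filter (fun p => p.2 == l.foldl (fun b p => max b p.2) a)).map (·.1),
       l.foldl (fun b p => max b p.2) a) := by
  induction l with
  | nil => intro ts a; simp
  | cons p l ih =>
    intro ts a
    have hle : max a p.2 ≤ l.foldl (fun b p => max b p.2) (max a p.2) :=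
      (PySem.List.le_foldl_max (l.map (·.2)) (max a p.2)).1.trans_eq (by rw [List.foldl_map])
    simp only [List.foldl_cons, List.filter_cons]
    by_cases h1 : p.2 > a
    · rw [show (if p.2 > (ts, a).2 then ([p.1], p.2)
            else if p.2 = (ts, a).2 then ((ts, a).1 ++ [p.1], (ts, a).2) else (ts, a)) = ([p.1], p.2)
          from by simp [h1]]
      rw [ih [p.1] p.2]
      have hmax : max a p.2 = p.2 := by omega
      simp only [hmax] at hle ⊢
      rw [if_neg (by omega : ¬ (a = l.foldl (fun b p => max b p.2) p.2))]
      by_cases hpm : p.2 = l.foldl (fun b p => max b p.2) p.2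
      · rw [if_pos hpm, if_pos (beq_iff_eq.mpr hpm)]
        simp
      · rw [if_neg hpm, if_neg (by simpa using hpm)]
    · by_cases h2 : p.2 = a
      · rw [show (if p.2 > (ts, a).2 then ([p.1], p.2)
              else if p.2 = (ts, a).2 then ((ts, a).1 ++ [p.1], (ts, a).2) else (ts, a)) = (ts ++ [p.1], a)
            from by simp [h2]]
        rw [ih (ts ++ [p.1]) a]
        have hmax : max a p.2 = a := by omega
        simp only [hmax]
        by_cases h3 : a = l.foldl (fun b p => max b p.2) a
        · rw [if_pos h3, if_pos h3, if_pos (show (p.2 == l.foldl (fun b p => max b p.2) a) = true from by rw [beq_iff_eq, h2]; exact h3)]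
          simp
        · rw [if_neg h3, if_neg h3, if_neg (show ¬ (p.2 == l.foldl (fun b p => max b p.2) a) = true from by rw [beq_iff_eq, h2]; exact h3)]
      · rw [show (if p.2 > (ts, a).2 then ([p.1], p.2)
              else if p.2 = (ts, a).2 then ((ts, a).1 ++ [p.1], (ts, a).2) else (ts, a)) = (ts, a)
            from by simp [h1, h2]]
        rw [ih ts a]
        have hmax : max a p.2 = a := by omega
        simp only [hmax] at hle ⊢
        rw [if_neg (show ¬ (p.2 == l.foldl (fun b p => max b p.2) a) = true from by rw [beq_iff_eq]; omega)]

lemma foldl_keys_getD (d : PySem.Dict Int Int) (l : List (Int × Int)) :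
    ∀ (acc : List Int × Int), (∀ p ∈ l, d.getD p.1 0 = p.2) →
    (l.map (·.1)).foldl
      (fun st time =>
        if d.getD time 0 > st.2 then ([time], d.getD time 0)
        else if d.getD time 0 = st.2 then (st.1 ++ [time], st.2)
        else st) acc
    = l.foldl
      (fun st p =>
        if p.2 > st.2 then ([p.1], p.2)
        else if p.2 = st.2 then (st.1 ++ [p.1], st.2)
        else st) acc := by
  induction l with
  | nil => intro acc _; rfl
  | cons p l ih =>
    intro acc h
    simp only [List.map_cons, List.foldl_cons]
    rw [h p List.mem_cons_self]
    exact ih _ (fun q hq => h q (List.mem_cons_of_mem _ hq))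

lemma incr_foldl (n : Int) (E : List Int) :
    ∀ (c : List Int), c.length = n.toNat →
      ((E.foldl (fun c i => if 0 ≤ i ∧ i < n
          then PySem.List.pySetD c i (PySem.List.pyGetD c i 0 + 1) else c) c).length = n.toNat ∧
       ∀ t : Nat, t < n.toNat →
        (E.foldl (fun c i => if 0 ≤ i ∧ i < n
          then PySem.List.pySetD c i (PySem.List.pyGetD c i 0 + 1) else c) c).getD t 0
          = c.getD t 0 + (E.count ((t : Nat) : Int) : Int)) := by
  induction E with
  | nil => intro c hc; exact ⟨hc, fun t _ => by simp⟩
  | cons x E ih =>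
    intro c hc
    simp only [List.foldl_cons]
    by_cases hg : 0 ≤ x ∧ x < n
    · rw [if_pos hg]
      have hx : x = ((x.toNat : Nat) : Int) := by omega
      have hxl : x.toNat < c.length := by omega
      have hset : PySem.List.pySetD c x (PySem.List.pyGetD c x 0 + 1)
          = c.set x.toNat (c.getD x.toNat 0 + 1) := by
        rw [hx, PySem.List.pySetD_natCast, PySem.List.pyGetD_natCast, Int.toNat_natCast]
      rw [hset]
      have hlen : (c.set x.toNat (c.getD x.toNat 0 + 1)).length = n.toNat := by
        simp [hc]
      obtain ⟨ihl, ihv⟩ := ih _ hlen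
      refine ⟨ihl, fun t ht => ?_⟩
      rw [ihv t ht]
      have hcount : (List.count ((t : Nat) : Int) (x :: E) : Int)
          = (List.count ((t : Nat) : Int) E : Int) + (if x = ((t : Nat) : Int) then 1 else 0) := by
        rw [List.count_cons]
        by_cases h : x = ((t : Nat) : Int)
        · simp [h]
        · have h2 : ¬ (((t : Nat) : Int) = x) := fun e => h e.symm
          simp [beq_iff_eq, h]
      rw [hcount]
      by_cases hxt : x = ((t : Nat) : Int)
      · have htt : x.toNat = t := by omega
        subst htt
        rw [List.getD_eq_getElem _ _ (by omega : x.toNat < (c.set x.toNat (c.getD x.toNat 0 + 1)).length),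
            List.getElem_set_self, if_pos hxt,
            List.getD_eq_getElem c 0 (by omega : x.toNat < c.length),
            ← List.getD_eq_getElem c 0 (by omega : x.toNat < c.length)]
        ring
      · have hne : x.toNat ≠ t := by omega
        rw [List.getD_eq_getElem _ _ (by omega : t < (c.set x.toNat (c.getD x.toNat 0 + 1)).length),
            List.getElem_set_ne (by omega), if_neg hxt,
            ← List.getD_eq_getElem c 0 (by omega : t < c.length)]
        ring
    · rw [if_neg hg]
      obtain ⟨ihl, ihv⟩ := ih c hc
      refine ⟨ihl, fun t ht => ?_⟩
      rw [ihv t ht]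
      have hxt : ¬ (((t : Nat) : Int) = x) := by
        intro h; apply hg; constructor <;> omega
      have hcn : (List.count ((t : Nat) : Int) (x :: E)) = List.count ((t : Nat) : Int) E := by
        rw [List.count_cons, if_neg (by simp [beq_iff_eq]; exact fun e => hxt e.symm)]
        omega
      rw [hcn]

-- positions of the sample sets containing hash h (as Python ints)
def pvIdx (S : List (List Int)) (h : Int) : List Int :=
  (List.range S.length).flatMap (fun j => if h ∈ S.getD j [] then [((j : Nat) : Int)] else [])

lemma enumerate_eq_range_map (T : List (List Int)) :
    PySem.List.enumerate T = (List.range T.length).map (fun k => (((k : Nat) : Int), T.getD k [])) := by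
  rw [PySem.List.enumerate_eq_map_pyRange T []]
  have : PySem.List.len T = ((T.length : Nat) : Int) := rfl
  rw [this, PySem.List.pyRange_zero_natCast, List.map_map]
  apply List.map_congr_left
  intro k _
  simp [PySem.List.pyGetD_natCast]

lemma index_getD_eq_pvIdx (S : List (List Int)) (hS : ∀ s ∈ S, s.Nodup) (h : Int) :
    ((PySem.List.enumerate S).foldl
      (fun d p => p.2.foldl (fun d h => d.modify h [] (· ++ [p.1])) d)
      PySem.Dict.empty).getD h [] = pvIdx S h := by
  rw [enumerate_eq_range_map, List.foldl_map]
  have hinner : ∀ (j : Nat) (d : PySem.Dict Int (List Int)),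
      (S.getD j []).foldl (fun d h => d.modify h [] (· ++ [((j : Nat) : Int)])) d
      = ((S.getD j []).map (fun h => (h, ((j : Nat) : Int)))).foldl
          (fun d q => d.modify q.1 [] (· ++ [q.2])) d := by
    intro j d; rw [List.foldl_map]
  have hflat :
      (List.range S.length).foldl
        (fun d j => (S.getD j []).foldl (fun d h => d.modify h [] (· ++ [((j : Nat) : Int)])) d)
        PySem.Dict.empty
      = ((List.range S.length).flatMap (fun j => (S.getD j []).map (fun h => (h, ((j : Nat) : Int))))).foldl
          (fun d q => d.modify q.1 [] (· ++ [q.2])) PySem.Dict.empty := by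
    rw [List.foldl_flatMap]
    exact PySem.List.foldl_congr_mem _ _ _ _ (fun d j _ => hinner j d)
  rw [hflat, PySem.Dict.getD_foldl_modify_append, List.filter_flatMap, List.map_flatMap]
  unfold pvIdx
  apply List.flatMap_congr
  intro j hj
  rw [List.mem_range] at hj
  rw [List.filter_map]
  by_cases hm : h ∈ S.getD j []
  · rw [if_pos hm]
    have h1 : (S.getD j []).filter ((fun q : Int × Int => q.1 == h) ∘ (fun h => (h, ((j : Nat) : Int)))) = [h] := by
      have : ((fun q : Int × Int => q.1 == h) ∘ (fun h => (h, ((j : Nat) : Int)))) = (fun x : Int => x == h) := rfl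
      rw [this, List.filter_beq,
        List.count_eq_one_of_mem (hS _ (by rw [List.getD_eq_getElem _ _ hj]; exact List.getElem_mem hj)) hm]
      rfl
    rw [h1]
    rfl
  · rw [if_neg hm]
    have h1 : (S.getD j []).filter ((fun q : Int × Int => q.1 == h) ∘ (fun h => (h, ((j : Nat) : Int)))) = [] := by
      have : ((fun q : Int × Int => q.1 == h) ∘ (fun h => (h, ((j : Nat) : Int)))) = (fun x : Int => x == h) := rfl
      rw [this, List.filter_beq, List.count_eq_zero.mpr hm]
      rfl
    rw [h1]
    rfl

lemma pvIdx_countP (S : List (List Int)) (k t : Nat) (h : Int) :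
    (pvIdx S h).countP (fun j => ((k : Nat) : Int) - j == ((t : Nat) : Int))
    = if t ≤ k ∧ k < t + S.length ∧ h ∈ S.getD (k - t) [] then 1 else 0 := by
  unfold pvIdx
  rw [List.countP_flatMap]
  have hcongr : ∀ j ∈ List.range S.length,
      (List.countP (fun j => ((k : Nat) : Int) - j == ((t : Nat) : Int)) ∘
        (fun j => if h ∈ S.getD j [] then [((j : Nat) : Int)] else [])) j
      = if j = k - t ∧ t ≤ k ∧ k < t + S.length ∧ h ∈ S.getD (k - t) [] then 1 else 0 := by
    intro j hj
    rw [List.mem_range] at hj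
    simp only [Function.comp]
    by_cases hm : h ∈ S.getD j []
    · rw [if_pos hm]
      by_cases he : ((k : Nat) : Int) - ((j : Nat) : Int) = ((t : Nat) : Int)
      · have hjkt : j = k - t ∧ t ≤ k ∧ k < t + S.length := by
          constructor
          · omega
          constructor
          · omega
          · omega
        rw [List.countP_singleton, if_pos (beq_iff_eq.mpr he),
            if_pos ⟨hjkt.1, hjkt.2.1, hjkt.2.2, by rw [← hjkt.1]; exact hm⟩]
      · rw [List.countP_singleton, if_neg (by simpa using he)]
        rw [if_neg (by intro hc; exact he (by omega))]
    · rw [if_neg hm]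
      rw [show List.countP (fun j => ((k : Nat) : Int) - j == ((t : Nat) : Int)) [] = 0 from rfl]
      rw [if_neg (by intro hc; exact hm (by rw [hc.1]; exact hc.2.2.2))]
  rw [List.map_congr_left hcongr]
  have hsum : ((List.range S.length).map
      (fun j => if j = k - t ∧ t ≤ k ∧ k < t + S.length ∧ h ∈ S.getD (k - t) [] then 1 else 0)).sum
      = ∑ j ∈ Finset.range S.length,
          (if j = k - t then (if t ≤ k ∧ k < t + S.length ∧ h ∈ S.getD (k - t) [] then 1 else 0) else 0) := by
    have : ∀ j, (if j = k - t ∧ t ≤ k ∧ k < t + S.length ∧ h ∈ S.getD (k - t) [] then 1 else 0)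
        = (if j = k - t then (if t ≤ k ∧ k < t + S.length ∧ h ∈ S.getD (k - t) [] then 1 else 0) else 0) := by
      intro j
      by_cases h1 : j = k - t <;> by_cases h2 : t ≤ k ∧ k < t + S.length ∧ h ∈ S.getD (k - t) [] <;>
        simp [h1, h2]
    simp only [this]
    rfl
  rw [hsum, Finset.sum_ite_eq' (Finset.range S.length) (k - t)]
  by_cases hmem : k - t ∈ Finset.range S.length
  · rw [if_pos hmem]
  · rw [if_neg hmem,
      if_neg (fun hc => hmem (Finset.mem_range.mpr (by obtain ⟨a, b, c⟩ := hc; omega)))]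

def pvScoreN (S T : List (List Int)) (t : Nat) : Nat :=
  ((List.range S.length).map
    (fun j => (T.getD (t + j) []).countP (fun h => decide (h ∈ S.getD j [])))).sum

lemma count_E (S T : List (List Int)) (t : Nat) (htm : t + S.length ≤ T.length) :
    ((List.range T.length).flatMap
      (fun k => (T.getD k []).flatMap
        (fun h => ((pvIdx S h).map (fun j => ((k : Nat) : Int) - j))))).count ((t : Nat) : Int)
    = pvScoreN S T t := by
  rw [List.count_flatMap]
  have hk : ∀ k ∈ List.range T.length,
      ((List.count ((t : Nat) : Int)) ∘
        (fun k => (T.getD k []).flatMap (fun h => ((pvIdx S h).map (fun j => ((k : Nat) : Int) - j))))) k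
      = if t ≤ k ∧ k < t + S.length
          then (T.getD k []).countP (fun h => decide (h ∈ S.getD (k - t) []))
          else 0 := by
    intro k hkk
    simp only [Function.comp]
    rw [List.count_flatMap]
    have hh : ∀ h ∈ T.getD k [],
        ((List.count ((t : Nat) : Int)) ∘ (fun h => (pvIdx S h).map (fun j => ((k : Nat) : Int) - j))) h
        = if t ≤ k ∧ k < t + S.length ∧ h ∈ S.getD (k - t) [] then 1 else 0 := by
      intro h _
      simp only [Function.comp]
      rw [List.count_eq_countP, List.countP_map]
      rw [show ((fun x => x == ((t : Nat) : Int)) ∘ (fun j => ((k : Nat) : Int) - j))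
          = (fun j => ((k : Nat) : Int) - j == ((t : Nat) : Int)) from rfl]
      exact pvIdx_countP S k t h
    rw [List.map_congr_left hh]
    by_cases hA : t ≤ k ∧ k < t + S.length
    · rw [if_pos hA]
      have : ∀ h ∈ T.getD k [],
          (if t ≤ k ∧ k < t + S.length ∧ h ∈ S.getD (k - t) [] then 1 else 0)
          = (if (fun h => decide (h ∈ S.getD (k - t) [])) h = true then 1 else 0) := by
        intro h _
        by_cases hm : h ∈ S.getD (k - t) []
        · rw [if_pos ⟨hA.1, hA.2, hm⟩, if_pos (by simpa using hm)]
        · rw [if_neg (fun hc => hm hc.2.2), if_neg (by simpa using hm)]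
      rw [List.map_congr_left this, PySem.List.sum_map_ite_one_zero_nat]
    · rw [if_neg hA]
      apply List.sum_eq_zero
      intro x hx
      rw [List.mem_map] at hx
      obtain ⟨h, _, rfl⟩ := hx
      rw [if_neg (fun hc => hA ⟨hc.1, hc.2.1⟩)]
  rw [List.map_congr_left hk]
  have hfin : ((List.range T.length).map
      (fun k => if t ≤ k ∧ k < t + S.length
        then (T.getD k []).countP (fun h => decide (h ∈ S.getD (k - t) [])) else 0)).sum
      = ∑ k ∈ Finset.range T.length,
          (if t ≤ k ∧ k < t + S.length
            then (T.getD k []).countP (fun h => decide (h ∈ S.getD (k - t) [])) else 0) := rfl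
  rw [hfin, Finset.sum_ite, Finset.sum_const_zero, add_zero]
  have hset : (Finset.range T.length).filter (fun k => t ≤ k ∧ k < t + S.length)
      = Finset.Ico t (t + S.length) := by
    ext k
    simp only [Finset.mem_filter, Finset.mem_range, Finset.mem_Ico]
    omega
  rw [hset, Finset.sum_Ico_eq_sum_range]
  have : t + S.length - t = S.length := by omega
  rw [this]
  unfold pvScoreN
  have hcong : ∀ i ∈ Finset.range S.length,
      (T.getD (t + i) []).countP (fun h => decide (h ∈ S.getD (t + i - t) []))
      = (T.getD (t + i) []).countP (fun h => decide (h ∈ S.getD i [])) := by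
    intro i _
    have : t + i - t = i := by omega
    rw [this]
  rw [Finset.sum_congr rfl hcong]
  rfl

lemma counts_eq (S T : List (List Int)) (hS : ∀ s ∈ S, s.Nodup)
    (hn : 0 < (T.length : Int) - (S.length : Int)) :
    ((PySem.List.enumerate T).foldl
      (fun c p => p.2.foldl
        (fun c h => (((PySem.List.enumerate S).foldl
            (fun d p => p.2.foldl (fun d h => d.modify h [] (· ++ [p.1])) d)
            PySem.Dict.empty).getD h []).foldl
          (fun c j =>
            if 0 ≤ p.1 - j ∧ p.1 - j < (T.length : Int) - (S.length : Int)
            then PySem.List.pySetD c (p.1 - j) (PySem.List.pyGetD c (p.1 - j) 0 + 1) else c)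
          c)
        c)
      (List.replicate ((T.length : Int) - (S.length : Int)).toNat (0 : Int)))
    = (List.range ((T.length : Int) - (S.length : Int)).toNat).map
        (fun t => (pvScoreN S T t : Int)) := by
  simp only [index_getD_eq_pvIdx S hS]
  rw [enumerate_eq_range_map, List.foldl_map]
  have hflat :
      (List.range T.length).foldl
        (fun c k => (T.getD k []).foldl
          (fun c h => (pvIdx S h).foldl
            (fun c j =>
              if 0 ≤ ((k : Nat) : Int) - j ∧ ((k : Nat) : Int) - j < (T.length : Int) - (S.length : Int)
              then PySem.List.pySetD c (((k : Nat) : Int) - j)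
                (PySem.List.pyGetD c (((k : Nat) : Int) - j) 0 + 1) else c)
            c)
          c)
        (List.replicate ((T.length : Int) - (S.length : Int)).toNat (0 : Int))
      = ((List.range T.length).flatMap
          (fun k => (T.getD k []).flatMap
            (fun h => (pvIdx S h).map (fun j => ((k : Nat) : Int) - j)))).foldl
          (fun c i =>
            if 0 ≤ i ∧ i < (T.length : Int) - (S.length : Int)
            then PySem.List.pySetD c i (PySem.List.pyGetD c i 0 + 1) else c)
          (List.replicate ((T.length : Int) - (S.length : Int)).toNat (0 : Int)) := by
    rw [List.foldl_flatMap]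
    apply PySem.List.foldl_congr_mem
    intro c k _
    rw [List.foldl_flatMap]
    apply PySem.List.foldl_congr_mem
    intro c h _
    rw [List.foldl_map]
  refine Eq.trans hflat ?_
  obtain ⟨hlen, hval⟩ := incr_foldl ((T.length : Int) - (S.length : Int)) _ _
    (List.length_replicate)
  apply List.ext_getElem
  · rw [hlen]; simp
  · intro t h1 h2
    rw [hlen] at h1
    rw [← List.getD_eq_getElem _ 0 (by rw [hlen]; exact h1), hval t h1]
    have htm : t + S.length ≤ T.length := by omega
    rw [count_E S T t htm]
    rw [List.getD_replicate]
    simp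
    omega

lemma countP_mem_comm (s t : List Int) (hs : s.Nodup) (ht : t.Nodup) :
    s.countP (fun x => decide (x ∈ t)) = t.countP (fun x => decide (x ∈ s)) := by
  rw [List.countP_eq_length_filter, List.countP_eq_length_filter]
  apply List.Perm.length_eq
  rw [List.perm_ext_iff_of_nodup (hs.filter _) (ht.filter _)]
  intro a
  simp only [List.mem_filter, decide_eq_true_eq]
  tauto

lemma pvScore_eq_pvScoreN (S T : List (List Int)) (hS : ∀ s ∈ S, s.Nodup)
    (hT : ∀ s ∈ T, s.Nodup) (t : Nat) (htm : t + S.length ≤ T.length) :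
    pvScore S T t = ((pvScoreN S T t : Nat) : Int) := by
  unfold pvScore pvScoreN
  have hzip : S.zip (List.take S.length (List.drop t T))
      = (List.range S.length).map (fun j => (S.getD j [], T.getD (t + j) [])) := by
    apply List.ext_getElem
    · simp; omega
    · intro j hj1 hj2
      have hjS : j < S.length := by simp at hj1; omega
      have hjT : t + j < T.length := by omega
      simp only [List.getElem_zip, List.getElem_map, List.getElem_range, List.getElem_take,
        List.getElem_drop]
      rw [List.getD_eq_getElem S [] hjS, List.getD_eq_getElem T [] hjT]
  rw [hzip, List.map_map]
  rw [show ((Nat.cast : Nat → Int) (((List.range S.length).map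
      (fun j => (T.getD (t + j) []).countP (fun h => decide (h ∈ S.getD j [])))).sum))
    = ((List.range S.length).map
      (fun j => (((T.getD (t + j) []).countP (fun h => decide (h ∈ S.getD j []))) : Int))).sum from by
    rw [Nat.cast_list_sum, List.map_map]; rfl]
  apply congrArg
  apply List.map_congr_left
  intro j hj
  rw [List.mem_range] at hj
  simp only [Function.comp]
  have hmemS : S.getD j [] ∈ S := by
    rw [List.getD_eq_getElem S [] hj]; exact List.getElem_mem hj
  have hmemT : T.getD (t + j) [] ∈ T := by
    have : t + j < T.length := by omega
    rw [List.getD_eq_getElem T [] this]; exact List.getElem_mem this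
  have hinter : PySem.Set.inter (S.getD j []) (T.getD (t + j) [])
      = (S.getD j []).filter (fun x => (T.getD (t + j) []).contains x) := rfl
  rw [hinter]
  have hlen : PySem.Set.len ((S.getD j []).filter (fun x => (T.getD (t + j) []).contains x))
      = (((S.getD j []).countP (fun x => (T.getD (t + j) []).contains x) : Nat) : Int) := by
    unfold PySem.Set.len
    rw [List.countP_eq_length_filter]
  rw [hlen]
  have hcont : (fun x => (T.getD (t + j) []).contains x) = (fun x => decide (x ∈ T.getD (t + j) [])) := by
    funext x
    simp
  rw [hcont, countP_mem_comm _ _ (hS _ hmemS) (hT _ hmemT)]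

lemma best_eq_foldl_max (counts : List Int) (hne : counts ≠ [])
    (hnn : ∀ y ∈ counts, 0 ≤ y) :
    (PySem.List.max? counts (fun x => x)).getD 0 = counts.foldl max 0 := by
  cases hmax : PySem.List.max? counts (fun x => x) with
  | none =>
    exact absurd ((PySem.List.max?_eq_none_iff counts (fun x => x)).mp hmax) hne
  | some v =>
    have hv1 : v ∈ counts := PySem.List.max?_mem hmax
    have hv2 : ∀ y ∈ counts, y ≤ v := PySem.List.max?_id_le hmax
    have h3 := PySem.List.le_foldl_max counts 0
    have h4 := PySem.List.foldl_max_mem counts 0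
    simp only [Option.getD_some]
    rcases h4 with h4 | h4
    · have : v ≤ 0 := h4 ▸ h3.2 v hv1
      have : 0 ≤ v := hnn v hv1
      omega
    · exact le_antisymm (h3.2 v hv1) (hv2 _ h4)


lemma values_update_sub {κ ν : Type} [BEq κ] [LawfulBEq κ] (ps : List (κ × ν)) :
    ∀ (d : PySem.Dict κ ν), ∀ v ∈ (d.update ps).values, v ∈ d.values ∨ ∃ p ∈ ps, v = p.2 := by
  induction ps with
  | nil => intro d v hv; exact Or.inl hv
  | cons p ps ih =>
    intro d v hv
    rcases ih (d.insert p.1 p.2) v hv with h | ⟨q, hq, rfl⟩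
    · rcases PySem.Dict.mem_values_insert d p.1 p.2 v h with h | h
      · exact Or.inr ⟨p, List.mem_cons_self, h⟩
      · exact Or.inl h
    · exact Or.inr ⟨q, List.mem_cons_of_mem _ hq, rfl⟩

lemma pvToDict_values_nodup (l : List (Int × List Int)) :
    ∀ v ∈ (pvToDict l).values, v.Nodup := by
  intro v hv
  rcases values_update_sub _ PySem.Dict.empty v hv with h | ⟨q, hq, rfl⟩
  · simp [PySem.Dict.empty, PySem.Dict.values] at h
  · rcases List.mem_map.mp hq with ⟨p, _, rfl⟩
    exact PySem.Set.nodup_ofList p.2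

lemma pvToDict_keys_nodup (l : List (Int × List Int)) : (pvToDict l).keys.Nodup :=
  PySem.Dict.nodup_keys_ofList _

-- ===== VERDICT (by name: the statement is the Claim_ definition above) =====
theorem best_matches_sw2_spec : Claim_equal_best_matches_sw2 := by
  intro sample song _
  unfold Spec_best_matches_sw2
  set dS := pvToDict sample with hdS
  set dT := pvToDict song with hdT
  set S := dS.values with hSdef
  set T := dT.values with hTdef
  set times := dT.keys with htimes
  set N := (((T.length : Int) - (S.length : Int))).toNat with hN
  set P := pvPairs times S T N with hP
  set M := P.foldl (fun b p => max b p.2) 0 with hM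
  have hS : ∀ s ∈ S, s.Nodup := pvToDict_values_nodup sample
  have hT : ∀ s ∈ T, s.Nodup := pvToDict_values_nodup song
  have hk : times.Nodup := pvToDict_keys_nodup song
  have htlen : times.length = T.length := keys_length_eq_values_length dT
  have hitems : (matches_dict_sw2 dS dT).items = P := matchesD_items dS dT hk
  have hkeys : (matches_dict_sw2 dS dT).keys = P.map (·.1) := by
    simp only [PySem.Dict.keys, hitems]
  have hPfst : P.map (·.1) = times.take N := by
    rw [hP]
    unfold pvPairs
    rw [List.map_map]
    rw [show ((fun p : Int × Int => p.1) ∘ (fun i => (times.getD i 0, pvScore S T i)))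
        = (fun i => times.getD i 0) from rfl]
    exact map_getD_range_eq_take times N 0 (by omega)
  have hknd : (matches_dict_sw2 dS dT).keys.Nodup := by
    rw [hkeys, hPfst]
    exact hk.sublist (List.take_sublist _ _)
  have hgetD : ∀ p ∈ P, (matches_dict_sw2 dS dT).getD p.1 0 = p.2 := by
    intro p hp
    exact PySem.Dict.getD_of_mem_items _ (by rw [hitems]; exact hp) hknd 0
  have hA : best_matches_sw2 sample song = ((P.filter (fun p => p.2 == M)).map (·.1), M) := by
    show (matches_dict_sw2 dS dT).keys.foldl _ ([], 0) = _
    rw [hkeys, foldl_keys_getD _ P ([], 0) hgetD, sel_spec' P [] 0]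
    simp only [ite_self, List.nil_append]
    rw [← hM]
  rw [hA]
  by_cases hn : ((T.length : Int) - (S.length : Int)) ≤ 0
  · have hN0 : N = 0 := by omega
    have hB : best_matches_sw2_alt sample song = ([], 0) := by
      unfold best_matches_sw2_alt
      simp only []
      rw [if_pos hn]
    rw [hB]
    have hPnil : P = [] := by rw [hP, hN0]; rfl
    rw [hPnil, hM, hPnil]
    rfl
  · have hmL : S.length < T.length := by omega
    have hNpos : 0 < N := by omega
    have hcntP : (List.range N).map (fun t => ((pvScoreN S T t : Nat) : Int)) = P.map (·.2) := by
      rw [hP]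
      unfold pvPairs
      rw [List.map_map]
      apply List.map_congr_left
      intro i hi
      rw [List.mem_range] at hi
      exact (pvScore_eq_pvScoreN S T hS hT i (by omega)).symm
    have hCne : (List.range N).map (fun t => ((pvScoreN S T t : Nat) : Int)) ≠ [] := by
      have hr : List.range N ≠ [] := by simpa [List.range_eq_nil] using hNpos.ne'
      exact fun h => hr (List.map_eq_nil_iff.mp h)
    have hCnn : ∀ y ∈ (List.range N).map (fun t => ((pvScoreN S T t : Nat) : Int)), 0 ≤ y := by
      intro y hy
      rcases List.mem_map.mp hy with ⟨t, _, rfl⟩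
      positivity
    have hb2 : (PySem.List.max? ((List.range N).map (fun t => ((pvScoreN S T t : Nat) : Int)))
        (fun x => x)).getD 0 = M := by
      rw [best_eq_foldl_max _ hCne hCnn, hcntP, List.foldl_map, hM]
    have hz : times.zip ((List.range N).map (fun t => ((pvScoreN S T t : Nat) : Int))) = P := by
      apply List.ext_getElem
      · rw [hP]; unfold pvPairs; simp; omega
      · intro i h1 h2
        have hiN : i < N := by simp at h1; omega
        have hiT : i < times.length := by omega
        simp only [hP, pvPairs, List.getElem_zip, List.getElem_map, List.getElem_range]
        rw [List.getD_eq_getElem times 0 hiT,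
          pvScore_eq_pvScoreN S T hS hT i (by omega)]
    have hB : best_matches_sw2_alt sample song
        = ((P.filter (fun p => p.2 == M)).map (·.1), M) := by
      unfold best_matches_sw2_alt
      simp only []
      rw [if_neg hn]
      rw [counts_eq S T hS (by omega)]
      rw [hb2, hz]
    rw [hB]
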